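-- pv_equiv track=rewrite | github.com/craftidev/playground | AdventOfCode2023/03/day3_1.py | chunking_next_element
-- ===== SOURCE A (Python) =====
-- def chunking_next_element(line):
--     isNumber = False
--     isSymbol = False
--     element = ''
--
--     for char in line:
--         if char == '.' and element == '':
--             continue
--         elif char == '.':
--             return element
--
--         if char.isdigit():
--             if isSymbol:
--                 return element
--             isNumber = True
--             element += str(char)
--         else:
--             if isNumber:
--                 return element
--             isSymbol = True
--             return char
--
--     return element
-- ===== SOURCE B (Python) =====
-- def chunking_next_element(line):
--     s = line.lstrip('.')
--     if not s:
--         return ''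
--     if not s[0].isdigit():
--         return s[0]
--     j = 1
--     while j < len(s) and s[j].isdigit():
--         j += 1
--     return s[:j]
-- ===== Notes on version B (the rewrite author's own statement) =====
-- stated objective: simpler
-- what changed: Replaced the isNumber/isSymbol flag state machine inside one loop by a three-phase decomposition: strip the leading dots with str.lstrip, classify the first remaining character, then take its leading digit run.
import Mathlib
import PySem

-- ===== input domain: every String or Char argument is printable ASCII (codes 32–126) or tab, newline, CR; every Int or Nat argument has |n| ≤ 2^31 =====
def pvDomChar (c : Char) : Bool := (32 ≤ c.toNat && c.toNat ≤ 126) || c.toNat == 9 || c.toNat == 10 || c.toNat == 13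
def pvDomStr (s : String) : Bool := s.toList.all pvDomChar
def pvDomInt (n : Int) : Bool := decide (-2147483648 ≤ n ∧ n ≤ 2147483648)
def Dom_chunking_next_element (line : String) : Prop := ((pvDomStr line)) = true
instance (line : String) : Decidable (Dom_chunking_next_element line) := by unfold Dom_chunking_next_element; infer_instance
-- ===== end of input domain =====

-- B replaces A's flag state machine by a strip-dots / classify / take-digit-run decomposition; objective: simpler.

-- ===== PORT A =====
-- the for-loop of A with its state (isNumber, isSymbol, element); early returns become results
def chunkALoop : List Char → Bool → Bool → List Char → List Char
  | [], _isNumber, _isSymbol, elem => elem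
  | c :: rest, isNumber, isSymbol, elem =>
    if c == '.' && elem == [] then chunkALoop rest isNumber isSymbol elem
    else if c == '.' then elem
    else if PySem.Chars.isdigit c then
      if isSymbol then elem
      else chunkALoop rest true isSymbol (elem ++ [c])
    else if isNumber then elem
    else [c]

def chunking_next_element (line : String) : String :=
  String.ofList (chunkALoop line.toList false false [])

-- ===== PORT B =====
-- s = line.lstrip('.')
-- the while loop collecting the leading digit run of s (starting after the known-digit s[0])
def chunking_next_element_alt (line : String) : String :=
  match line.toList.dropWhile (· == '.') with
  | [] => ""
  | c :: rest =>
    if !(PySem.Chars.isdigit c) then String.ofList [c]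
    else String.ofList (c :: rest.takeWhile PySem.Chars.isdigit)

-- ===== PRECONDITION & SPEC =====
def Spec_chunking_next_element (line : String) (out : String) : Prop := out = chunking_next_element_alt line
instance (line : String) (out : String) : Decidable (Spec_chunking_next_element line out) := by unfold Spec_chunking_next_element; infer_instance

-- ===== CLAIM (what is proved, stated in full; the proofs are below) =====
def Claim_equal_chunking_next_element : Prop := ∀ (line : String), Dom_chunking_next_element line → Spec_chunking_next_element line (chunking_next_element line)

-- ===== LEMMAS AND PROOFS =====

-- once a digit has been collected (elem ≠ [], isNumber = true, isSymbol = false),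
-- A's loop appends exactly the leading digit run of the remaining characters
theorem chunkALoop_run (cs : List Char) (elem : List Char) (h : elem ≠ []) :
    chunkALoop cs true false elem = elem ++ cs.takeWhile PySem.Chars.isdigit := by
  induction cs generalizing elem with
  | nil => simp [chunkALoop]
  | cons c rest ih =>
    by_cases hd : c = '.'
    · subst hd
      simp [chunkALoop, h, PySem.Chars.isdigit]
    · simp only [chunkALoop, List.takeWhile_cons]
      have hne : (c == '.') = false := by simp [hd]
      by_cases hdig : PySem.Chars.isdigit c
      · simp [hne, hdig, ih (elem ++ [c]) (by simp)]
      · simp [hne, hdig]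

-- from the initial state, A's loop is: drop leading dots, then classify / collect
theorem chunkALoop_start (cs : List Char) :
    chunkALoop cs false false [] =
      (match cs.dropWhile (· == '.') with
       | [] => []
       | c :: rest =>
         if PySem.Chars.isdigit c then c :: rest.takeWhile PySem.Chars.isdigit else [c]) := by
  induction cs with
  | nil => simp [chunkALoop]
  | cons c rest ih =>
    by_cases hd : c = '.'
    · subst hd
      simpa [chunkALoop, List.dropWhile_cons] using ih
    · have hne : (c == '.') = false := by simp [hd]
      simp only [chunkALoop, List.dropWhile_cons, hne]
      by_cases hdig : PySem.Chars.isdigit c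
      · simp [hdig, chunkALoop_run rest [c] (by simp)]
      · simp [hdig]

-- ===== VERDICT (by name: the statement is the Claim_ definition above) =====
theorem chunking_next_element_spec : Claim_equal_chunking_next_element := by
  intro line _
  unfold Spec_chunking_next_element chunking_next_element chunking_next_element_alt
  rw [chunkALoop_start]
  cases h : line.toList.dropWhile (· == '.') with
  | nil => rfl
  | cons c rest =>
    by_cases hdig : PySem.Chars.isdigit c <;> simp [hdig]
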